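-- pv_equiv track=rewrite | github.com/pypi-data/pypi-mirror-392 | packages/util-intelligence/util_intelligence-0.8.11-py3-none-any.whl/util_intelligence/func.py | align3d
-- ===== SOURCE A (Python) =====
-- def align3d(values, fill=0):
--     lengths = [[len(x) for x in y] for y in values]
--     maxlen0 = max([max(x) for x in lengths])
--     maxlen1 = max([len(x) for x in lengths])
--     nvalues = []
--     for row in values:
--         nrow = []
--         for line in row:
--             line = list(line) + [fill] * (maxlen0 - len(line))
--             nrow.append(line)
--         nrow += [[fill] * maxlen0] * (maxlen1 - len(row))
--         nvalues.append(nrow)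
--     return nvalues
-- ===== SOURCE B (Python) =====
-- def align3d(values, fill=0):
--     maxlen0 = max(len(line) for row in values for line in row)
--     maxlen1 = max(len(row) for row in values)
--     return [
--         [
--             [row[j][k] if k < len(row[j]) else fill for k in range(maxlen0)]
--             if j < len(row) else [fill] * maxlen0
--             for j in range(maxlen1)
--         ]
--         for row in values
--     ]
-- ===== Notes on version B (the rewrite author's own statement) =====
-- stated objective: alternative
-- what changed: B replaces A's copy-and-append-padding folds with index-driven generation: it computes the two maxima in one pass (flattened generator / per-row generator) and then builds every output cell by comprehension over range(maxlen1) x range(maxlen0), choosing the source element when the index exists and fill otherwise.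
import Mathlib
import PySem

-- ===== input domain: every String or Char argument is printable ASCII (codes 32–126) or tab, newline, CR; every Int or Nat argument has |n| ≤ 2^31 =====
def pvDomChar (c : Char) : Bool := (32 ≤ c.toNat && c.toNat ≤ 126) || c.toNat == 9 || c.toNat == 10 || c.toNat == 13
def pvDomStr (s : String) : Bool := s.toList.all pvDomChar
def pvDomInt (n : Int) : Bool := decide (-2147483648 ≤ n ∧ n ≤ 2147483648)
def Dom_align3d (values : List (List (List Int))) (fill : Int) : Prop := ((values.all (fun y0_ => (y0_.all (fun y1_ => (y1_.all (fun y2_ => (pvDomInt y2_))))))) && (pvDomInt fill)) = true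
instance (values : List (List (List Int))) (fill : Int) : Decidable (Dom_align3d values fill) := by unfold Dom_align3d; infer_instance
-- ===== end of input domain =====

-- B pads by generating every cell from its (j, k) index instead of A's copy-then-append-padding
-- folds (objective: alternative decomposition, same cost).

-- ===== PORT A =====
-- A: nested folds, each line copied then extended by fill-padding, each row extended by all-fill lines.
def align3d (values : List (List (List Int))) (fill : Int) : List (List (List Int)) :=
  let lengths := values.map (fun y => y.map (fun x => (x.length : Int)))
  -- max([...]) under Pre_ is never on an empty list; .getD 0 is unreachable there
  let maxlen0 := (PySem.List.max? (lengths.map (fun x => (PySem.List.max? x (fun v => v)).getD 0)) (fun v => v)).getD 0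
  let maxlen1 := (PySem.List.max? (lengths.map (fun x => (x.length : Int))) (fun v => v)).getD 0
  values.foldl (fun nvalues row =>
    let nrow := row.foldl (fun nrow line =>
      nrow ++ [line ++ List.replicate (maxlen0 - (line.length : Int)).toNat fill]) ([] : List (List Int))
    let nrow2 := nrow ++ List.replicate (maxlen1 - (row.length : Int)).toNat (List.replicate maxlen0.toNat fill)
    nvalues ++ [nrow2]) []

-- ===== PORT B =====
-- B: one flattened pass for each maximum, then every cell generated from its index.
def align3d_alt (values : List (List (List Int))) (fill : Int) : List (List (List Int)) :=
  let maxlen0 := (PySem.List.max? (values.flatMap (fun row => row.map (fun line => (line.length : Int)))) (fun v => v)).getD 0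
  let maxlen1 := (PySem.List.max? (values.map (fun row => (row.length : Int))) (fun v => v)).getD 0
  values.map (fun row =>
    (PySem.List.pyRange 0 maxlen1 1).map (fun j =>
      if j < (row.length : Int) then
        let line := PySem.List.pyGetD row j []
        (PySem.List.pyRange 0 maxlen0 1).map (fun k =>
          if k < (line.length : Int) then PySem.List.pyGetD line k 0 else fill)
      else List.replicate maxlen0.toNat fill))

-- ===== PRECONDITION & SPEC =====
-- Pre_ excludes exactly the inputs on which A raises ValueError: empty values, or a row with no lines
-- (max() of an empty sequence).
def Pre_align3d (values : List (List (List Int))) (fill : Int) : Prop :=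
  values ≠ [] ∧ ∀ row ∈ values, row ≠ []
instance (values : List (List (List Int))) (fill : Int) : Decidable (Pre_align3d values fill) := by
  unfold Pre_align3d; infer_instance
def pvWitness_align3d : List (List (List Int)) × Int := ([[[1, 2], [3]], [[4]]], 7)

def Spec_align3d (values : List (List (List Int))) (fill : Int) (out : List (List (List Int))) : Prop := out = align3d_alt values fill
instance (values : List (List (List Int))) (fill : Int) (out : List (List (List Int))) : Decidable (Spec_align3d values fill out) := by unfold Spec_align3d; infer_instance

-- ===== CLAIM (what is proved, stated in full; the proofs are below) =====
def Claim_equal_align3d : Prop := ∀ (values : List (List (List Int))) (fill : Int), Dom_align3d values fill → Pre_align3d values fill → Spec_align3d values fill (align3d values fill)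

-- ===== LEMMAS AND PROOFS =====

-- max(l) as a total function: 0 for [], running max otherwise (matches (max? l id).getD 0).
def pvMax (l : List Int) : Int :=
  match l with
  | [] => 0
  | a :: t => t.foldl max a

lemma pvMax_cons (a : Int) (t : List Int) : pvMax (a :: t) = t.foldl max a := rfl

lemma pvMax_eq_max?_getD (l : List Int) :
    (PySem.List.max? l (fun v => v)).getD 0 = pvMax l := by
  cases l with
  | nil => rfl
  | cons a t => rw [PySem.List.max?_id_cons]; rfl

lemma le_pvMax (l : List Int) (y : Int) (hy : y ∈ l) : y ≤ pvMax l := by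
  cases l with
  | nil => cases hy
  | cons a t =>
    rcases List.mem_cons.mp hy with h | h
    · subst h; exact (PySem.List.le_foldl_max t y).1
    · exact (PySem.List.le_foldl_max t a).2 y h

lemma foldl_max_comm (t : List Int) (a b : Int) :
    t.foldl max (max a b) = max a (t.foldl max b) :=
  List.foldl_assoc

lemma pvMax_map_eq_flatten (L : List (List Int)) (hne : ∀ x ∈ L, x ≠ []) (init : Int) :
    (L.map (fun x => pvMax x)).foldl max init = (L.flatMap id).foldl max init := by
  induction L generalizing init with
  | nil => rfl
  | cons y ys ih =>
    have hy : y ≠ [] := hne y (List.mem_cons_self)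
    cases y with
    | nil => exact absurd rfl hy
    | cons b bs =>
      simp only [List.map_cons, List.foldl_cons, List.flatMap_cons, id_eq, List.cons_append,
        List.foldl_append, pvMax_cons]
      rw [ih (fun x hx => hne x (List.mem_cons_of_mem _ hx)), foldl_max_comm bs init b,
        foldl_max_comm]

-- A's nested max equals B's max over the flattened lengths (all rows nonempty, list nonempty).
lemma maxes_eq (L : List (List Int)) (hL : L ≠ []) (hne : ∀ x ∈ L, x ≠ []) :
    pvMax (L.map (fun x => pvMax x)) = pvMax (L.flatMap id) := by
  cases L with
  | nil => exact absurd rfl hL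
  | cons y ys =>
    have hy : y ≠ [] := hne y (List.mem_cons_self)
    cases y with
    | nil => exact absurd rfl hy
    | cons b bs =>
      simp only [List.map_cons, List.flatMap_cons, id_eq, List.cons_append, pvMax_cons,
        List.foldl_append]
      rw [pvMax_map_eq_flatten ys (fun x hx => hne x (List.mem_cons_of_mem _ hx))]

-- index-generation over range(n) = copy plus padding, for n ≥ len(l)
lemma gen_eq_pad {α β : Type} (l : List α) (d : α) (f : α → β) (c : β) (n : Int)
    (hn : (l.length : Int) ≤ n) :
    (PySem.List.pyRange 0 n 1).map
        (fun j => if j < (l.length : Int) then f (PySem.List.pyGetD l j d) else c)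
      = l.map f ++ List.replicate (n - (l.length : Int)).toNat c := by
  rw [show n = ((n.toNat : Int)) by omega, PySem.List.pyRange_zero_natCast]
  apply List.ext_getElem
  · simp; omega
  · intro k hk1 hk2
    simp only [List.getElem_map, List.getElem_range]
    have hkn : k < n.toNat := by simpa using hk1
    rw [PySem.List.pyGetD_natCast]
    by_cases hkl : k < l.length
    · rw [if_pos (by exact_mod_cast hkl), List.getElem_append_left (by simpa using hkl),
        List.getElem_map, List.getD_eq_getElem l d hkl]
    · rw [if_neg (by omega), List.getElem_append_right (by simpa using hkl),
        List.getElem_replicate]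

-- the append-singleton fold is a map
lemma foldl_app_map {α β : Type} (l : List α) (f : α → β) (init : List β) :
    l.foldl (fun acc x => acc ++ [f x]) init = init ++ l.map f := by
  induction l generalizing init with
  | nil => simp
  | cons x xs ih => simp [ih]

-- ===== VERDICT (by name: the statement is the Claim_ definition above) =====
theorem align3d_spec : Claim_equal_align3d := by
  intro values fill _ hpre
  obtain ⟨hnil, hrows⟩ := hpre
  show align3d values fill = align3d_alt values fill
  unfold align3d align3d_alt
  simp only [pvMax_eq_max?_getD]
  set L : List (List Int) := values.map (fun y => y.map (fun x => (x.length : Int))) with hLdef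
  have hLne : ∀ x ∈ L, x ≠ [] := by
    intro x hx
    rcases List.mem_map.mp hx with ⟨row, hrow, rfl⟩
    simpa using hrows row hrow
  have hLnil : L ≠ [] := by simpa [hLdef] using hnil
  have hflat : values.flatMap (fun row => row.map (fun line => (line.length : Int)))
      = L.flatMap id := by
    simp [hLdef, List.flatMap_map]
  have hm0 : pvMax (L.map (fun x => pvMax x)) = pvMax (L.flatMap id) := maxes_eq L hLnil hLne
  have hm1 : L.map (fun x => (x.length : Int)) = values.map (fun row => (row.length : Int)) := by
    simp [hLdef]
  rw [hflat, hm0, hm1]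
  set m0 : Int := pvMax (L.flatMap id) with hm0def
  set m1 : Int := pvMax (values.map (fun row => (row.length : Int))) with hm1def
  have hline : ∀ row ∈ values, ∀ line ∈ row, (line.length : Int) ≤ m0 := by
    intro row hrow line hlinemem
    apply le_pvMax
    rw [← hflat]
    exact List.mem_flatMap.mpr ⟨row, hrow, List.mem_map.mpr ⟨line, hlinemem, rfl⟩⟩
  have hrowlen : ∀ row ∈ values, (row.length : Int) ≤ m1 :=
    fun row hrow => le_pvMax _ _ (List.mem_map.mpr ⟨row, hrow, rfl⟩)
  rw [foldl_app_map values _ [], List.nil_append]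
  apply List.map_congr_left
  intro row hrow
  rw [foldl_app_map row _ [], List.nil_append]
  rw [← gen_eq_pad row []
        (fun line => line ++ List.replicate (m0 - (line.length : Int)).toNat fill)
        (List.replicate m0.toNat fill) m1 (hrowlen row hrow)]
  apply List.map_congr_left
  intro j hj
  by_cases hjl : j < (row.length : Int)
  · rw [if_pos hjl, if_pos hjl]
    have hj0 : 0 ≤ j := by
      have := PySem.List.mem_pyRange_one.mp hj
      omega
    have hmem : PySem.List.pyGetD row j [] ∈ row := by
      have hlt : j.toNat < row.length := by omega
      rw [show j = ((j.toNat : Int)) by omega, PySem.List.pyGetD_natCast,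
        List.getD_eq_getElem row [] hlt]
      exact List.getElem_mem hlt
    have hlen := hline row hrow _ hmem
    have h := gen_eq_pad (PySem.List.pyGetD row j []) 0 (fun v => v) fill m0 hlen
    simp only [List.map_id'] at h
    exact h.symm
  · rw [if_neg hjl, if_neg hjl]
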